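-- pv_equiv track=rewrite | github.com/shubhamvvyas/Projects | Supermarket.py | supermarket
-- ===== SOURCE A (Python) =====
-- def supermarket(Items):
--     n = len(Items)
--     Items = sorted(Items, key=lambda x: (x[1], x[0]))
--     a, b = Items[n-1]
--     profit = a
--     for i in range(1, n):
--         a, b = Items[i]
--         c, d = Items[i-1]
--         if(b == d):
--             continue
--         profit = profit + c
--     return profit
-- ===== SOURCE B (Python) =====
-- def supermarket(Items):
--     # One pass: max profit per distinct deadline, then sum; avoids the sort.
--     best = {}
--     for p, d in Items:
--         best[d] = p if d not in best else max(best[d], p)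
--     return sum(best.values())
-- ===== Notes on version B (the rewrite author's own statement) =====
-- stated objective: alternative
-- what changed: Replaces sort-by-(deadline,profit) plus an indexed scan over run boundaries with a single dict pass keeping the maximum profit per deadline and summing the values (O(n) instead of O(n log n), though a timing run could not measure a difference).
-- outside the precondition, e.g. on supermarket([]): A raises IndexError, B returns 0
-- crash fix: On an empty Items list A raises IndexError (Items[n-1]); B returns 0. — e.g. on supermarket([]): A raises IndexError, B returns 0
import Mathlib
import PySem

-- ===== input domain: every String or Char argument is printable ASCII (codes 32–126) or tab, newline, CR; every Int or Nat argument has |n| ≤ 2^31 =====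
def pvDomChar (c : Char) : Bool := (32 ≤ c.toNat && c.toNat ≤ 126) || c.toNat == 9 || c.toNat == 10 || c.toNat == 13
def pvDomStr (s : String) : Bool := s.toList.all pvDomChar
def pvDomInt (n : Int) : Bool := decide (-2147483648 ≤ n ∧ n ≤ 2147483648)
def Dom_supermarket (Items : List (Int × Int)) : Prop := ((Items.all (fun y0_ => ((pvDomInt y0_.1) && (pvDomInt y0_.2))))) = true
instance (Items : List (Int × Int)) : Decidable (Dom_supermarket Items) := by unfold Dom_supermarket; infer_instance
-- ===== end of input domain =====

-- B replaces A's sort-by-(deadline, profit) plus boundary scan by a single dict pass keeping the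
-- maximum profit per deadline and summing the values.
-- On the empty list A raises IndexError (excluded by Pre_); B returns 0 there.

-- ===== PORT A =====
def supermarket (Items : List (Int × Int)) : Int :=
  let n : Int := Items.length
  let its := PySem.List.sorted2 Items (fun x => x.2) (fun x => x.1)
  match PySem.List.pyGet? its (n - 1) with
  | none => 0  -- Python raises IndexError here (only reachable for Items = []); excluded by Pre_
  | some ab =>
    (PySem.List.pyRange 1 n 1).foldl (fun profit i =>
      match PySem.List.pyGet? its i, PySem.List.pyGet? its (i - 1) with
      | some xi, some xim => if xi.2 == xim.2 then profit else profit + xim.1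
      | _, _ => profit) ab.1

-- ===== PORT B =====
def supermarket_alt (Items : List (Int × Int)) : Int :=
  let best : PySem.Dict Int Int := Items.foldl (fun best pd =>
    best.insert pd.2 (if !best.contains pd.2 then pd.1 else max (best.getD pd.2 0) pd.1))
    PySem.Dict.empty
  best.values.foldl (fun acc v => acc + v) 0

-- ===== PRECONDITION & SPEC =====
-- Pre_ excludes only the empty list, on which Python A raises IndexError.
def Pre_supermarket (Items : List (Int × Int)) : Prop := Items ≠ []
instance (Items : List (Int × Int)) : Decidable (Pre_supermarket Items) := by unfold Pre_supermarket; infer_instance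
def pvWitness_supermarket : (List (Int × Int)) := [(5, 2), (3, 1), (4, 2)]

-- On empty Items A raises IndexError (Items[n-1]); B returns 0.
def Raises_supermarket (Items : List (Int × Int)) : Prop := Items = []
instance (Items : List (Int × Int)) : Decidable (Raises_supermarket Items) := by unfold Raises_supermarket; infer_instance
def pvRaiseWitness_supermarket : (List (Int × Int)) := []
def pvRaiseWitnessOut_supermarket : Int := 0

def Spec_supermarket (Items : List (Int × Int)) (out : Int) : Prop := out = supermarket_alt Items
instance (Items : List (Int × Int)) (out : Int) : Decidable (Spec_supermarket Items out) := by unfold Spec_supermarket; infer_instance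

-- ===== CLAIM (what is proved, stated in full; the proofs are below) =====
def Claim_equal_supermarket : Prop := ∀ (Items : List (Int × Int)), Dom_supermarket Items → Pre_supermarket Items → Spec_supermarket Items (supermarket Items)
def Claim_raises_supermarket : Prop := (∀ (Items : List (Int × Int)), Dom_supermarket Items → Raises_supermarket Items → ¬ Pre_supermarket Items) ∧ (Dom_supermarket (pvRaiseWitness_supermarket) ∧ Raises_supermarket (pvRaiseWitness_supermarket) ∧ supermarket_alt (pvRaiseWitness_supermarket) = pvRaiseWitnessOut_supermarket)

-- ===== LEMMAS AND PROOFS =====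

-- proof-side abbreviations
def pvS (L : List (Int × Int)) : List (Int × Int) :=
  PySem.List.sorted2 L (fun x => x.2) (fun x => x.1)

def pvBlex (a b : Int × Int) : Bool :=
  decide (a.2 < b.2) || (!decide (b.2 < a.2) && decide (a.1 < b.1))

def pvLexLe (a b : Int × Int) : Prop := a.2 < b.2 ∨ (a.2 = b.2 ∧ a.1 ≤ b.1)

def pvMv (L : List (Int × Int)) (d : Int) : Option Int :=
  ((L.filter (fun x => x.2 == d)).map Prod.fst).max?

def pvSetSum (L : List (Int × Int)) : Int :=
  ((PySem.Set.ofList (L.map Prod.snd)).map (fun d => (pvMv L d).getD 0)).sum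

def pvRunSum : List (Int × Int) → Int
  | [] => 0
  | [x] => x.1
  | x :: y :: t => (if y.2 == x.2 then 0 else x.1) + pvRunSum (y :: t)

-- max? facts
theorem pvMaxPerm {l1 l2 : List Int} (h : l1.Perm l2) : l1.max? = l2.max? := by
  cases h1 : l1.max? with
  | none =>
    rw [List.max?_eq_none_iff] at h1
    subst h1
    have h2 : l2 = [] := List.perm_nil.mp h.symm
    simp [h2]
  | some m =>
    rw [List.max?_eq_some_iff] at h1
    symm
    rw [List.max?_eq_some_iff]
    exact ⟨h.mem_iff.mp h1.1, fun b hb => h1.2 b (h.mem_iff.mpr hb)⟩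

theorem pvMaxConcat (l : List Int) (a : Int) :
    (l ++ [a]).max? = some (l.max?.elim a (fun m => max m a)) := by
  cases h1 : l.max? with
  | none =>
    rw [List.max?_eq_none_iff] at h1
    subst h1
    simp [List.max?_cons]
  | some m =>
    rw [List.max?_eq_some_iff] at h1
    simp only [Option.elim]
    rw [List.max?_eq_some_iff]
    constructor
    · rcases max_choice m a with h | h <;> rw [h]
      · exact List.mem_append_left _ h1.1
      · exact List.mem_append_right _ (by simp)
    · intro b hb
      rcases List.mem_append.mp hb with hb | hb
      · exact le_trans (h1.2 b hb) (le_max_left m a)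
      · simp at hb
        exact hb ▸ le_max_right m a

-- sortedness of A's sorted list
theorem pvBlex_le {a b : Int × Int} (h : pvBlex a b = true) : pvLexLe a b := by
  simp [pvBlex] at h
  unfold pvLexLe
  omega

theorem pvBlex_ge {a b : Int × Int} (h : pvBlex a b = false) : pvLexLe b a := by
  simp [pvBlex] at h
  unfold pvLexLe
  omega

theorem pvLexLe_trans {a b c : Int × Int} (h1 : pvLexLe a b) (h2 : pvLexLe b c) : pvLexLe a c := by
  unfold pvLexLe at *
  omega

theorem pvInsertBy_cons_true {x y : Int × Int} {ys : List (Int × Int)} (h : pvBlex x y = true) :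
    PySem.List.insertBy pvBlex x (y :: ys) = x :: y :: ys := by
  simp [PySem.List.insertBy, h]

theorem pvInsertBy_cons_false {x y : Int × Int} {ys : List (Int × Int)} (h : pvBlex x y = false) :
    PySem.List.insertBy pvBlex x (y :: ys) = y :: PySem.List.insertBy pvBlex x ys := by
  simp [PySem.List.insertBy, h]

theorem pvInsertBy_pairwise (x : Int × Int) : ∀ (ys : List (Int × Int)), ys.Pairwise pvLexLe →
    (PySem.List.insertBy pvBlex x ys).Pairwise pvLexLe
  | [], _ => by simp [PySem.List.insertBy, pvLexLe]
  | y :: ys, h => by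
    rw [List.pairwise_cons] at h
    obtain ⟨hy, hys⟩ := h
    by_cases hb : pvBlex x y = true
    · rw [pvInsertBy_cons_true hb]
      refine List.pairwise_cons.mpr ⟨?_, List.pairwise_cons.mpr ⟨hy, hys⟩⟩
      intro z hz
      rcases List.mem_cons.mp hz with rfl | hz
      · exact pvBlex_le hb
      · exact pvLexLe_trans (pvBlex_le hb) (hy z hz)
    · have hb' : pvBlex x y = false := by simpa using hb
      rw [pvInsertBy_cons_false hb']
      refine List.pairwise_cons.mpr ⟨?_, pvInsertBy_pairwise x ys hys⟩
      intro z hz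
      rcases (PySem.List.insertBy_mem_iff pvBlex x z ys).mp hz with rfl | hz
      · exact pvBlex_ge hb'
      · exact hy z hz

theorem pvFold_pairwise : ∀ (L : List (Int × Int)) (acc : List (Int × Int)), acc.Pairwise pvLexLe →
    (L.foldl (fun acc x => PySem.List.insertBy pvBlex x acc) acc).Pairwise pvLexLe
  | [], _, h => h
  | x :: L, acc, h => pvFold_pairwise L _ (pvInsertBy_pairwise x acc h)

theorem pvSorted_pairwise (L : List (Int × Int)) : (pvS L).Pairwise pvLexLe :=
  pvFold_pairwise L [] (by simp)

-- PySem.Set.ofList facts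
theorem pvAdd_cons (s : List Int) (a b : Int) (h : b ≠ a) :
    PySem.Set.add (a :: s) b = a :: PySem.Set.add s b := by
  by_cases hm : b ∈ s <;> simp [PySem.Set.add, PySem.Set.contains, h, hm]

theorem pvFoldlAdd_cons : ∀ (l : List Int) (s : List Int) (a : Int), a ∉ l →
    l.foldl PySem.Set.add (a :: s) = a :: l.foldl PySem.Set.add s
  | [], _, _, _ => rfl
  | b :: l, s, a, h => by
    have hba : b ≠ a := by
      rintro rfl
      exact h (by simp)
    rw [List.foldl_cons, List.foldl_cons, pvAdd_cons s a b hba,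
        pvFoldlAdd_cons l _ a (fun hm => h (List.mem_cons_of_mem _ hm))]

theorem pvOfList_cons_notmem (a : Int) (l : List Int) (h : a ∉ l) :
    PySem.Set.ofList (a :: l) = a :: PySem.Set.ofList l :=
  pvFoldlAdd_cons l [] a h

theorem pvOfList_cons_self (a : Int) (l : List Int) :
    PySem.Set.ofList (a :: a :: l) = PySem.Set.ofList (a :: l) := by
  simp [PySem.Set.ofList, PySem.Set.add, PySem.Set.empty, PySem.Set.contains]

-- pvMv facts
theorem pvMv_cons_ne {x : Int × Int} {S : List (Int × Int)} {d : Int} (h : x.2 ≠ d) :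
    pvMv (x :: S) d = pvMv S d := by
  unfold pvMv
  rw [List.filter_cons]
  simp [h]

theorem pvMv_cons_eq (x : Int × Int) (S : List (Int × Int)) (d : Int) (h : x.2 = d) :
    pvMv (x :: S) d = (x.1 :: ((S.filter (fun z => z.2 == d)).map Prod.fst)).max? := by
  unfold pvMv
  rw [List.filter_cons]
  simp [h]

-- the two set-sum recursions along a sorted list
theorem pvSetSum_cons_dup (x y : Int × Int) (t : List (Int × Int)) (hd : x.2 = y.2)
    (hp : (x :: y :: t).Pairwise pvLexLe) : pvSetSum (x :: y :: t) = pvSetSum (y :: t) := by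
  obtain ⟨hx, hp'⟩ := List.pairwise_cons.mp hp
  have hx1 : x.1 ≤ y.1 := by
    have h1 := hx y (by simp)
    unfold pvLexLe at h1
    omega
  unfold pvSetSum
  have hset : PySem.Set.ofList ((x :: y :: t).map Prod.snd) = PySem.Set.ofList ((y :: t).map Prod.snd) := by
    simp only [List.map_cons]
    rw [hd]
    exact pvOfList_cons_self _ _
  rw [hset]
  refine congrArg List.sum (List.map_congr_left ?_)
  intro d hdm
  by_cases hxd : x.2 = d
  · have hyd : y.2 = d := hd ▸ hxd
    rw [pvMv_cons_eq x (y :: t) d hxd]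
    have hy1 : y.1 ∈ ((y :: t).filter (fun z => z.2 == d)).map Prod.fst := by
      simp [hyd]
    cases hms : (((y :: t).filter (fun z => z.2 == d)).map Prod.fst).max? with
    | none =>
      rw [List.max?_eq_none_iff] at hms
      rw [hms] at hy1
      simp at hy1
    | some m =>
      have hchar := List.max?_eq_some_iff.mp hms
      have hym : y.1 ≤ m := hchar.2 _ hy1
      have hmax : (x.1 :: ((y :: t).filter (fun z => z.2 == d)).map Prod.fst).max? = some m := by
        rw [List.max?_eq_some_iff]
        refine ⟨List.mem_cons_of_mem _ hchar.1, ?_⟩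
        intro b hb
        rcases List.mem_cons.mp hb with rfl | hb
        · exact le_trans hx1 hym
        · exact hchar.2 b hb
      rw [hmax]
      unfold pvMv
      rw [hms]
  · rw [pvMv_cons_ne hxd]

theorem pvSetSum_cons_new (x y : Int × Int) (t : List (Int × Int)) (hd : x.2 ≠ y.2)
    (hp : (x :: y :: t).Pairwise pvLexLe) : pvSetSum (x :: y :: t) = x.1 + pvSetSum (y :: t) := by
  obtain ⟨hx, hp'⟩ := List.pairwise_cons.mp hp
  obtain ⟨hy, hp''⟩ := List.pairwise_cons.mp hp'
  have hnot : x.2 ∉ (y :: t).map Prod.snd := by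
    intro hm
    rcases List.mem_map.mp hm with ⟨z, hz, hz2⟩
    rcases List.mem_cons.mp hz with rfl | hz
    · exact hd hz2.symm
    · have h1 := hx y (by simp)
      have h2 := hy z hz
      unfold pvLexLe at h1 h2
      omega
  unfold pvSetSum
  simp only [List.map_cons]
  simp only [List.map_cons] at hnot
  rw [pvOfList_cons_notmem _ _ hnot, List.map_cons, List.sum_cons]
  have hhead : (pvMv (x :: y :: t) x.2).getD 0 = x.1 := by
    rw [pvMv_cons_eq x (y :: t) x.2 rfl]
    have hfil : (y :: t).filter (fun z => z.2 == x.2) = [] := by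
      rw [List.filter_eq_nil_iff]
      intro z hz
      simp only [beq_iff_eq]
      intro hzx
      exact hnot (hzx ▸ List.mem_map_of_mem hz)
    rw [hfil]
    simp [List.max?_cons]
  rw [hhead]
  congr 1
  refine congrArg List.sum (List.map_congr_left ?_)
  intro d hdm
  have hd' : x.2 ≠ d := by
    rintro rfl
    exact hnot ((PySem.Set.mem_ofList _ _).mp hdm)
  rw [pvMv_cons_ne hd']

theorem pvRunSum_eq_setSum : ∀ (S : List (Int × Int)), S ≠ [] → S.Pairwise pvLexLe →
    pvRunSum S = pvSetSum S
  | [], h, _ => absurd rfl h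
  | [x], _, _ => by
    simp [pvRunSum, pvSetSum, pvMv, PySem.Set.ofList, PySem.Set.add, PySem.Set.empty,
      PySem.Set.contains, List.filter_cons, List.max?_cons]
  | x :: y :: t, _, hp => by
    have ih := pvRunSum_eq_setSum (y :: t) (by simp) ((List.pairwise_cons.mp hp).2)
    by_cases hd : x.2 = y.2
    · have hbe : (y.2 == x.2) = true := by simp [hd]
      rw [pvSetSum_cons_dup x y t hd hp, ← ih]
      simp [pvRunSum, hbe]
    · have hbe : (y.2 == x.2) = false := by
        rw [beq_eq_false_iff_ne]
        exact fun hh => hd hh.symm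
      rw [pvSetSum_cons_new x y t hd hp, ← ih]
      simp [pvRunSum, hbe]

-- A's indexed loop as a structural scan
theorem pvRunSum_zip : ∀ (S : List (Int × Int)), S ≠ [] →
    pvRunSum S = (S.getD (S.length - 1) (0, 0)).1 +
      ((S.zip S.tail).map (fun p => if p.2.2 == p.1.2 then 0 else p.1.1)).sum
  | [], h => absurd rfl h
  | [x], _ => by simp [pvRunSum]
  | x :: y :: t, _ => by
    have ih := pvRunSum_zip (y :: t) (by simp)
    simp only [pvRunSum]
    rw [ih]
    simp only [List.length_cons, List.tail_cons, List.zip_cons_cons, List.map_cons, List.sum_cons]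
    have h1 : t.length + 1 + 1 - 1 = t.length + 1 := rfl
    have h2 : t.length + 1 - 1 = t.length := rfl
    rw [h1, h2, List.getD_cons_succ]
    try ring

theorem pvMap_range_eq_zip (S : List (Int × Int)) :
    (PySem.List.pyRange 1 (S.length : Int) 1).map
      (fun i => if (S.getD i.toNat (0, 0)).2 == (S.getD (i.toNat - 1) (0, 0)).2 then 0
                else (S.getD (i.toNat - 1) (0, 0)).1)
    = (S.zip S.tail).map (fun p => if p.2.2 == p.1.2 then 0 else p.1.1) := by
  apply List.ext_getElem
  · simp only [List.length_map, PySem.List.length_pyRange_one, List.length_zip,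
      List.length_tail]
    omega
  · intro j h1 h2
    have hjS : j + 1 < S.length := by
      simp only [List.length_map, PySem.List.length_pyRange_one] at h1
      omega
    simp only [List.getElem_map, List.getElem_zip, List.getElem_tail,
      PySem.List.getElem_pyRange_one]
    have hj1 : ((1 : Int) + (j : Int)).toNat = j + 1 := by omega
    rw [hj1]
    have hj0 : j + 1 - 1 = j := rfl
    rw [hj0, List.getD_eq_getElem S (0, 0) hjS, List.getD_eq_getElem S (0, 0) (by omega : j < S.length)]

theorem pvA_unfold (L : List (Int × Int)) :
    supermarket L =
      match PySem.List.pyGet? (pvS L) ((L.length : Int) - 1) with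
      | none => 0
      | some ab =>
        (PySem.List.pyRange 1 (L.length : Int) 1).foldl (fun profit i =>
          match PySem.List.pyGet? (pvS L) i, PySem.List.pyGet? (pvS L) (i - 1) with
          | some xi, some xim => if xi.2 == xim.2 then profit else profit + xim.1
          | _, _ => profit) ab.1 := rfl

theorem pvA_eq_runSum (L : List (Int × Int)) (h : L ≠ []) :
    supermarket L = pvRunSum (pvS L) := by
  have hperm := PySem.List.sorted2_perm L (fun x => x.2) (fun x => x.1) false
  have hlen : (pvS L).length = L.length := hperm.length_eq
  have hpos : 0 < L.length := List.length_pos_of_ne_nil h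
  have hSne : pvS L ≠ [] := by
    intro h0
    rw [h0] at hlen
    simp at hlen
    omega
  rw [pvA_unfold]
  have hidx : (L.length : Int) - 1 = (((pvS L).length - 1 : Nat) : Int) := by omega
  rw [hidx, PySem.List.pyGet?_natCast,
    List.getElem?_eq_getElem (by omega : (pvS L).length - 1 < (pvS L).length)]
  show (PySem.List.pyRange 1 (L.length : Int) 1).foldl _ ((pvS L)[(pvS L).length - 1]).1
      = pvRunSum (pvS L)
  have hbody := PySem.List.foldl_congr_mem
    (PySem.List.pyRange 1 (L.length : Int) 1)
    (fun profit i =>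
      match PySem.List.pyGet? (pvS L) i, PySem.List.pyGet? (pvS L) (i - 1) with
      | some xi, some xim => if xi.2 == xim.2 then profit else profit + xim.1
      | _, _ => profit)
    (fun acc i => acc +
      (if ((pvS L).getD i.toNat (0, 0)).2 == ((pvS L).getD (i.toNat - 1) (0, 0)).2 then 0
       else ((pvS L).getD (i.toNat - 1) (0, 0)).1))
    ((pvS L)[(pvS L).length - 1]).1
    (by
      intro acc i hi
      have hib := PySem.List.mem_pyRange_one.mp hi
      have hg1 : PySem.List.pyGet? (pvS L) i = some ((pvS L).getD i.toNat (0, 0)) := by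
        have h0 := PySem.List.pyGet?_natCast (pvS L) i.toNat
        rw [show ((i.toNat : Nat) : Int) = i by omega] at h0
        rw [h0, List.getElem?_eq_getElem (by omega : i.toNat < (pvS L).length),
          List.getD_eq_getElem (pvS L) (0, 0) (by omega : i.toNat < (pvS L).length)]
      have hg2 : PySem.List.pyGet? (pvS L) (i - 1) = some ((pvS L).getD (i.toNat - 1) (0, 0)) := by
        have h0 := PySem.List.pyGet?_natCast (pvS L) (i.toNat - 1)
        rw [show ((i.toNat - 1 : Nat) : Int) = i - 1 by omega] at h0
        rw [h0, List.getElem?_eq_getElem (by omega : i.toNat - 1 < (pvS L).length),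
          List.getD_eq_getElem (pvS L) (0, 0) (by omega : i.toNat - 1 < (pvS L).length)]
      dsimp only
      rw [hg1, hg2]
      dsimp only
      simp only [beq_iff_eq]
      split_ifs with hcc <;> ring)
  rw [hbody, PySem.List.foldl_add]
  have hcast : (L.length : Int) = ((pvS L).length : Int) := by omega
  rw [hcast, pvMap_range_eq_zip (pvS L), pvRunSum_zip (pvS L) hSne,
    List.getD_eq_getElem (pvS L) (0, 0) (by omega : (pvS L).length - 1 < (pvS L).length)]

-- B's dict pass computes the per-deadline maximum
theorem pvGet?_bfold (L : List (Int × Int)) (d : Int) :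
    (L.foldl (fun best pd =>
        best.insert pd.2 (if !best.contains pd.2 then pd.1 else max (best.getD pd.2 0) pd.1))
      PySem.Dict.empty).get? d = pvMv L d := by
  induction L using List.reverseRecOn with
  | nil => simp [pvMv, PySem.Dict.get?_empty]
  | append_singleton T x ih =>
    rw [List.foldl_append, List.foldl_cons, List.foldl_nil]
    by_cases hxd : x.2 = d
    · subst hxd
      rw [PySem.Dict.get?_insert_self]
      unfold pvMv
      rw [List.filter_append, List.map_append]
      simp only [List.filter_cons, List.filter_nil, beq_self_eq_true, if_true, List.map_cons,
        List.map_nil]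
      rw [pvMaxConcat]
      rw [show ((T.filter (fun z => z.2 == x.2)).map Prod.fst).max? = pvMv T x.2 from rfl]
      rw [PySem.Dict.contains_eq_isSome_get?, ih, PySem.Dict.getD_eq_get?_getD, ih]
      cases hmv : pvMv T x.2 <;> simp
    · rw [PySem.Dict.get?_insert_of_ne _ _ (fun hh => hxd hh.symm), ih]
      unfold pvMv
      rw [List.filter_append]
      simp [hxd]

theorem pvAlt_eq (L : List (Int × Int)) : supermarket_alt L = pvSetSum L := by
  show ((L.foldl (fun best pd =>
      best.insert pd.2 (if !best.contains pd.2 then pd.1 else max (best.getD pd.2 0) pd.1))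
    PySem.Dict.empty).values).foldl (fun acc v => acc + v) 0 = pvSetSum L
  have hnd : (L.foldl (fun best pd =>
      best.insert pd.2 (if !best.contains pd.2 then pd.1 else max (best.getD pd.2 0) pd.1))
    PySem.Dict.empty).keys.Nodup := by
    refine PySem.Dict.nodup_keys_foldl_insert_key L Prod.snd
      (fun best pd => if !best.contains pd.2 then pd.1 else max (best.getD pd.2 0) pd.1)
      PySem.Dict.empty ?_
    simp [PySem.Dict.keys_empty]
  rw [PySem.Dict.values_eq_map_keys _ hnd 0,
    PySem.Dict.keys_foldl_insert_key L Prod.snd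
      (fun best pd => if !best.contains pd.2 then pd.1 else max (best.getD pd.2 0) pd.1)
      PySem.Dict.empty,
    PySem.Dict.keys_empty, PySem.Set.update_nil_left,
    PySem.List.foldl_add _ (fun v => v) 0]
  simp only [List.map_id', zero_add]
  unfold pvSetSum
  refine congrArg List.sum (List.map_congr_left ?_)
  intro d hdm
  rw [PySem.Dict.getD_eq_get?_getD, pvGet?_bfold]

-- permutation invariance of the per-deadline-max sum
theorem pvMv_perm (L1 L2 : List (Int × Int)) (h : L1.Perm L2) (d : Int) :
    pvMv L1 d = pvMv L2 d :=
  pvMaxPerm ((h.filter _).map _)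

theorem pvSetSum_perm (L1 L2 : List (Int × Int)) (h : L1.Perm L2) :
    pvSetSum L1 = pvSetSum L2 := by
  unfold pvSetSum
  have hsets : (PySem.Set.ofList (L1.map Prod.snd)).Perm (PySem.Set.ofList (L2.map Prod.snd)) := by
    rw [List.perm_ext_iff_of_nodup (PySem.Set.nodup_ofList _) (PySem.Set.nodup_ofList _)]
    intro a
    rw [PySem.Set.mem_ofList, PySem.Set.mem_ofList]
    exact (h.map Prod.snd).mem_iff
  calc ((PySem.Set.ofList (L1.map Prod.snd)).map (fun d => (pvMv L1 d).getD 0)).sum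
      = ((PySem.Set.ofList (L1.map Prod.snd)).map (fun d => (pvMv L2 d).getD 0)).sum := by
        refine congrArg List.sum (List.map_congr_left ?_)
        intro d _
        rw [pvMv_perm L1 L2 h d]
    _ = ((PySem.Set.ofList (L2.map Prod.snd)).map (fun d => (pvMv L2 d).getD 0)).sum :=
        (hsets.map _).sum_eq

-- ===== VERDICT (by name: the statement is the Claim_ definition above) =====
theorem supermarket_spec : Claim_equal_supermarket := by
  intro Items _ hpre
  show supermarket Items = supermarket_alt Items
  have hSne : pvS Items ≠ [] := by
    intro h0
    have hperm : (pvS Items).Perm Items :=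
      PySem.List.sorted2_perm Items (fun x => x.2) (fun x => x.1) false
    rw [h0] at hperm
    exact hpre (List.perm_nil.mp hperm.symm)
  rw [pvA_eq_runSum Items hpre,
    pvRunSum_eq_setSum (pvS Items) hSne (pvSorted_pairwise Items),
    pvSetSum_perm (pvS Items) Items (PySem.List.sorted2_perm Items _ _ false),
    pvAlt_eq]

theorem supermarket_raises : Claim_raises_supermarket := by
  unfold Claim_raises_supermarket
  constructor
  · intro Items _ hr
    unfold Raises_supermarket at hr
    unfold Pre_supermarket
    simp [hr]
  · exact ⟨by decide, by decide, by decide⟩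

-- self-check: the raise witness is excluded by Pre_ (via supermarket_raises) while pvWitness_ satisfies it
theorem pvWitness_sides_ok :
    Pre_supermarket pvWitness_supermarket ∧ ¬ Pre_supermarket pvRaiseWitness_supermarket :=
  ⟨by decide, supermarket_raises.1 pvRaiseWitness_supermarket (by decide) rfl⟩
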